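-- pv_equiv track=rewrite | github.com/ryuya-matsunawa/Atcoder | submissions/ABC274/d.py | dp
-- ===== SOURCE A (Python) =====
-- def dp(l, s, f):
--     st = set([s])
--     for k in l:
--         tmp = set([])
--         for v in st:
--             tmp.add(v + k)
--             tmp.add(v - k)
--         st = set(tmp)
--     return f in st
-- ===== SOURCE B (Python) =====
-- def dp(l, s, f):
--     # Meet in the middle: split l into two halves, recursively build each half's
--     # set of reachable offsets, then hash-join: f reachable iff f-s = a + b with
--     # a from the left half and b from the right half. O(2^(n/2)) worst case vs A's O(2^n).
--     def reach(ks):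
--         if not ks:
--             return {0}
--         k = ks[0]
--         r = reach(ks[1:])
--         return {x + k for x in r} | {x - k for x in r}
--
--     half = len(l) // 2
--     left = reach(l[:half])
--     right = reach(l[half:])
--     t = f - s
--     return any(t - a in right for a in left)
-- ===== Notes on version B (the rewrite author's own statement) =====
-- stated objective: faster
-- what changed: B uses meet-in-the-middle: it recursively builds the reachable-offset sets of the two halves of l separately and hash-joins them (any(t - a in right)), instead of A's single forward expansion of one set of absolute values over the whole list; the working sets are half-length, exponentially smaller in the worst case.
import Mathlib
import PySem

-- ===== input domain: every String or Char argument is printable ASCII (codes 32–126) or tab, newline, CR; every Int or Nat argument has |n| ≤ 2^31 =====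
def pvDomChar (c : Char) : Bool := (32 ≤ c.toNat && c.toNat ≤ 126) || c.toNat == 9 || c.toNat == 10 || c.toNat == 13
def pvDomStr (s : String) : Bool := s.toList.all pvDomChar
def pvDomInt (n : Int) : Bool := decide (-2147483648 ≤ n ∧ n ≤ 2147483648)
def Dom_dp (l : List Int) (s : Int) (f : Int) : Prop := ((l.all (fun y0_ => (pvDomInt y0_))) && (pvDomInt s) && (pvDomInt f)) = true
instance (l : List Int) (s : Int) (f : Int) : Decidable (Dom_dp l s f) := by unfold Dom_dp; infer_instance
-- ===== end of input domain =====

-- B replaces A's single forward set expansion by meet-in-the-middle: the reachable-offset sets of the two halves of l are built recursively and hash-joined.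

-- ===== PORT A =====
-- inner loop: tmp = set(); for v in st: tmp.add(v+k); tmp.add(v-k)
def dpStep (k : Int) (st : PySem.Set Int) : PySem.Set Int :=
  st.foldl (fun tmp v => PySem.Set.add (PySem.Set.add tmp (v + k)) (v - k)) (PySem.Set.ofList [])

def dp (l : List Int) (s : Int) (f : Int) : Bool :=
  let st := l.foldl (fun st k => dpStep k st) (PySem.Set.ofList [s])
  PySem.Set.contains st f

-- ===== PORT B =====
-- reach(ks): if not ks: {0}; else {x+k for x in reach(ks[1:])} | {x-k for x in reach(ks[1:])}
def reachB : List Int → PySem.Set Int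
  | [] => PySem.Set.ofList [0]
  | k :: ks =>
    let r := reachB ks
    PySem.Set.union (r.foldl (fun t x => PySem.Set.add t (x + k)) PySem.Set.empty)
                    (r.foldl (fun t x => PySem.Set.add t (x - k)) PySem.Set.empty)

-- half = len(l)//2; l[:half]/l[half:] are take/drop (half ≥ 0); any(t - a in right for a in left)
def dp_alt (l : List Int) (s : Int) (f : Int) : Bool :=
  let half := l.length / 2
  let left := reachB (l.take half)
  let right := reachB (l.drop half)
  let t := f - s
  left.foldl (fun acc a => acc || PySem.Set.contains right (t - a)) false

-- ===== PRECONDITION & SPEC =====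
def Spec_dp (l : List Int) (s : Int) (f : Int) (out : Bool) : Prop := out = dp_alt l s f
instance (l : List Int) (s : Int) (f : Int) (out : Bool) : Decidable (Spec_dp l s f out) := by unfold Spec_dp; infer_instance

-- ===== CLAIM (what is proved, stated in full; the proofs are below) =====
def Claim_equal_dp : Prop := ∀ (l : List Int) (s : Int) (f : Int), Dom_dp l s f → Spec_dp l s f (dp l s f)

-- ===== LEMMAS AND PROOFS =====

-- x is an offset reachable by choosing a sign for each element of the list
inductive Rch : List Int → Int → Prop
  | nil : Rch [] 0
  | add (k : Int) (ks : List Int) (y : Int) : Rch ks y → Rch (k :: ks) (y + k)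
  | sub (k : Int) (ks : List Int) (y : Int) : Rch ks y → Rch (k :: ks) (y - k)

lemma rch_nil_iff (x : Int) : Rch [] x ↔ x = 0 := by
  constructor
  · intro h; cases h; rfl
  · rintro rfl; exact Rch.nil

lemma rch_cons_iff (k : Int) (ks : List Int) (x : Int) :
    Rch (k :: ks) x ↔ ∃ y, Rch ks y ∧ (x = y + k ∨ x = y - k) := by
  constructor
  · intro h
    cases h with
    | add _ _ y hy => exact ⟨y, hy, Or.inl rfl⟩
    | sub _ _ y hy => exact ⟨y, hy, Or.inr rfl⟩
  · rintro ⟨y, hy, rfl | rfl⟩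
    · exact Rch.add k ks y hy
    · exact Rch.sub k ks y hy

lemma rch_append (l1 l2 : List Int) (x : Int) :
    Rch (l1 ++ l2) x ↔ ∃ a b, Rch l1 a ∧ Rch l2 b ∧ x = a + b := by
  induction l1 generalizing x with
  | nil =>
    simp only [List.nil_append, rch_nil_iff]
    constructor
    · intro h; exact ⟨0, x, rfl, h, by ring⟩
    · rintro ⟨a, b, rfl, hb, rfl⟩; simpa using hb
  | cons k l1 ih =>
    constructor
    · intro h
      rw [List.cons_append, rch_cons_iff] at h
      obtain ⟨y, hy, hc⟩ := h
      obtain ⟨a, b, ha, hb, rfl⟩ := (ih y).mp hy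
      rcases hc with rfl | rfl
      · exact ⟨a + k, b, Rch.add k l1 a ha, hb, by ring⟩
      · exact ⟨a - k, b, Rch.sub k l1 a ha, hb, by ring⟩
    · rintro ⟨a, b, ha, hb, rfl⟩
      rw [List.cons_append, rch_cons_iff]
      obtain ⟨y, hy, rfl | rfl⟩ := (rch_cons_iff k l1 a).mp ha
      · exact ⟨y + b, (ih _).mpr ⟨y, b, hy, hb, rfl⟩, Or.inl (by ring)⟩
      · exact ⟨y + b, (ih _).mpr ⟨y, b, hy, hb, rfl⟩, Or.inr (by ring)⟩

lemma mem_foldl_add_map (g : Int → Int) (ys : List Int) (x : Int) :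
    ∀ init : PySem.Set Int,
      (x ∈ ys.foldl (fun t v => PySem.Set.add t (g v)) init ↔ x ∈ init ∨ ∃ v ∈ ys, x = g v) := by
  induction ys with
  | nil => simp
  | cons y ys ih =>
    intro init
    simp only [List.foldl_cons, ih, PySem.Set.mem_add, List.mem_cons]
    constructor
    · rintro ((h | h) | ⟨v, hv, h⟩)
      · exact Or.inl h
      · exact Or.inr ⟨y, Or.inl rfl, h⟩
      · exact Or.inr ⟨v, Or.inr hv, h⟩
    · rintro (h | ⟨v, rfl | hv, h⟩)
      · exact Or.inl (Or.inl h)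
      · exact Or.inl (Or.inr h)
      · exact Or.inr ⟨v, hv, h⟩

lemma mem_reachB (ks : List Int) (x : Int) : x ∈ reachB ks ↔ Rch ks x := by
  induction ks generalizing x with
  | nil => simp [reachB, PySem.Set.ofList, rch_nil_iff]
  | cons k ks ih =>
    rw [reachB, PySem.Set.mem_union, mem_foldl_add_map, mem_foldl_add_map, rch_cons_iff]
    simp only [PySem.Set.empty, List.not_mem_nil, false_or]
    constructor
    · rintro (⟨v, hv, rfl⟩ | ⟨v, hv, rfl⟩)
      · exact ⟨v, (ih _).mp hv, Or.inl rfl⟩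
      · exact ⟨v, (ih _).mp hv, Or.inr rfl⟩
    · rintro ⟨y, hy, rfl | rfl⟩
      · exact Or.inl ⟨y, (ih _).mpr hy, rfl⟩
      · exact Or.inr ⟨y, (ih _).mpr hy, rfl⟩

lemma mem_dpStep (k : Int) (st : PySem.Set Int) (x : Int) :
    x ∈ dpStep k st ↔ ∃ v ∈ st, x = v + k ∨ x = v - k := by
  unfold dpStep
  have h : ∀ (ys : List Int) (init : PySem.Set Int),
      x ∈ ys.foldl (fun tmp v => PySem.Set.add (PySem.Set.add tmp (v + k)) (v - k)) init ↔
        x ∈ init ∨ ∃ v ∈ ys, x = v + k ∨ x = v - k := by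
    intro ys
    induction ys with
    | nil => simp
    | cons y ys ih =>
      intro init
      simp only [List.foldl_cons, ih, PySem.Set.mem_add, List.mem_cons]
      constructor
      · rintro ((((h | h) | h) | ⟨v, hv, h⟩))
        · exact Or.inl h
        · exact Or.inr ⟨y, Or.inl rfl, Or.inl h⟩
        · exact Or.inr ⟨y, Or.inl rfl, Or.inr h⟩
        · exact Or.inr ⟨v, Or.inr hv, h⟩
      · rintro (h | ⟨v, rfl | hv, h⟩)
        · exact Or.inl (Or.inl (Or.inl h))
        · rcases h with h | h
          · exact Or.inl (Or.inl (Or.inr h))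
          · exact Or.inl (Or.inr h)
        · exact Or.inr ⟨v, hv, h⟩
  rw [h]
  simp [PySem.Set.ofList]

-- A's forward expansion reaches v from some u ∈ st by the offsets of l
lemma mem_foldA (l : List Int) :
    ∀ (st : PySem.Set Int) (v : Int),
      v ∈ l.foldl (fun st k => dpStep k st) st ↔ ∃ u ∈ st, Rch l (v - u) := by
  induction l with
  | nil =>
    intro st v
    simp only [List.foldl_nil, rch_nil_iff]
    constructor
    · intro h; exact ⟨v, h, by omega⟩
    · rintro ⟨u, hu, h⟩
      have : v = u := by omega
      rwa [this]
  | cons k l ih =>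
    intro st v
    simp only [List.foldl_cons, ih, rch_cons_iff]
    constructor
    · rintro ⟨u', hu', h⟩
      obtain ⟨u, hu, hc⟩ := (mem_dpStep k st u').mp hu'
      rcases hc with rfl | rfl
      · exact ⟨u, hu, v - (u + k), h, Or.inl (by omega)⟩
      · exact ⟨u, hu, v - (u - k), h, Or.inr (by omega)⟩
    · rintro ⟨u, hu, y, hy, h | h⟩
      · refine ⟨u + k, (mem_dpStep k st _).mpr ⟨u, hu, Or.inl rfl⟩, ?_⟩
        have : v - (u + k) = y := by omega
        exact this ▸ hy
      · refine ⟨u - k, (mem_dpStep k st _).mpr ⟨u, hu, Or.inr rfl⟩, ?_⟩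
        have : v - (u - k) = y := by omega
        exact this ▸ hy

-- any(...) as a fold with ||
lemma foldl_or_any (p : Int → Bool) (xs : List Int) :
    ∀ b : Bool, xs.foldl (fun acc a => acc || p a) b = true ↔ b = true ∨ ∃ a ∈ xs, p a = true := by
  induction xs with
  | nil => simp
  | cons x xs ih =>
    intro b
    simp only [List.foldl_cons, ih, Bool.or_eq_true, List.mem_cons]
    constructor
    · rintro ((h | h) | ⟨a, ha, hp⟩)
      · exact Or.inl h
      · exact Or.inr ⟨x, Or.inl rfl, h⟩
      · exact Or.inr ⟨a, Or.inr ha, hp⟩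
    · rintro (h | ⟨a, rfl | ha, hp⟩)
      · exact Or.inl (Or.inl h)
      · exact Or.inl (Or.inr hp)
      · exact Or.inr ⟨a, ha, hp⟩

-- ===== VERDICT (by name: the statement is the Claim_ definition above) =====
theorem dp_spec : Claim_equal_dp := by
  intro l s f _
  unfold Spec_dp dp dp_alt
  rw [Bool.eq_iff_iff, PySem.Set.contains_iff, mem_foldA, foldl_or_any]
  simp only [PySem.Set.mem_ofList, List.mem_singleton, Bool.false_eq_true, false_or]
  constructor
  · rintro ⟨u, rfl, h⟩
    have h2 := (rch_append (l.take (l.length / 2)) (l.drop (l.length / 2)) (f - u)).mp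
      (by rw [List.take_append_drop]; exact h)
    obtain ⟨a, b, ha, hb, hab⟩ := h2
    refine ⟨a, (mem_reachB _ _).mpr ha, ?_⟩
    rw [PySem.Set.contains_iff, mem_reachB]
    have : f - u - a = b := by omega
    exact this ▸ hb
  · rintro ⟨a, ha, hc⟩
    rw [PySem.Set.contains_iff, mem_reachB] at hc
    refine ⟨s, rfl, ?_⟩
    have h := (rch_append (l.take (l.length / 2)) (l.drop (l.length / 2)) (f - s)).mpr
      ⟨a, f - s - a, (mem_reachB _ _).mp ha, hc, by omega⟩
    rwa [List.take_append_drop] at h
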